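-- pv_equiv track=rewrite | github.com/rhowardstone/ubiome | 04_Analysis/utils/Summarize_Rosetta_by_subregion.py | reverse_fasta
-- ===== SOURCE A (Python) =====
-- def reverse_fasta(fasta):
--     '''Returns map from sequence to list of IDs with that sequence'''
--     duplists = {}
--     for ID in fasta:
--         if fasta[ID] not in duplists:
--             duplists[fasta[ID]] = [ID]
--         else:
--             duplists[fasta[ID]].append(ID)
--     return duplists
-- ===== SOURCE B (Python) =====
-- def reverse_fasta(fasta):
--     '''Returns map from sequence to list of IDs with that sequence'''
--     seqs = dict.fromkeys(fasta.values())
--     return {s: [ID for ID in fasta if fasta[ID] == s] for s in seqs}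
-- ===== Notes on version B (the rewrite author's own statement) =====
-- stated objective: alternative
-- what changed: A buckets IDs in one pass with conditional insert/append into a dict; B first collects the distinct sequence values (dict.fromkeys) and then builds each group with one comprehension over the whole input per distinct value.
import Mathlib
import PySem

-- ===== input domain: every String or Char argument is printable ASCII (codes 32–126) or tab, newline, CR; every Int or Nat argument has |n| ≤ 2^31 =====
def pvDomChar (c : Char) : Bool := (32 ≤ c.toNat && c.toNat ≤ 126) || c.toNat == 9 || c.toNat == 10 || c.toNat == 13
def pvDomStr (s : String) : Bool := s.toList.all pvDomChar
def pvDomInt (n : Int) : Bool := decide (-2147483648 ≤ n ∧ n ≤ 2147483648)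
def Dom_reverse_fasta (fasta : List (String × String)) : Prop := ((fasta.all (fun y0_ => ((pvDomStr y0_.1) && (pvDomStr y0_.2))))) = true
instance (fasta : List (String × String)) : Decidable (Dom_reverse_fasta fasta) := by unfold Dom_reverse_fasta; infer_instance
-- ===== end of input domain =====

-- B replaces A's one-pass hash bucketing with a two-pass scheme (distinct values first,
-- then one comprehension per value); objective: alternative, not faster.

-- ===== PORT A =====
-- A iterates over the dict's keys and looks each value up; since dict keys are unique,
-- iterating the (key, value) pairs and using the pair's value is exact.
def reverse_fasta (fasta : List (String × String)) : List (String × List String) :=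
  (fasta.foldl
    (fun (d : PySem.Dict String (List String)) (p : String × String) =>
      if d.contains p.2 then d.modify p.2 [] (fun l => l ++ [p.1])
      else d.insert p.2 [p.1])
    PySem.Dict.empty).items

-- ===== PORT B =====
def reverse_fasta_alt (fasta : List (String × String)) : List (String × List String) :=
  (PySem.List.dedup (fasta.map Prod.snd)).map
    (fun s => (s, (fasta.filter (fun p => p.2 == s)).map Prod.fst))

-- ===== PRECONDITION & SPEC =====
def Spec_reverse_fasta (fasta : List (String × String)) (out : List (String × List String)) : Prop := out = reverse_fasta_alt fasta
instance (fasta : List (String × String)) (out : List (String × List String)) : Decidable (Spec_reverse_fasta fasta out) := by unfold Spec_reverse_fasta; infer_instance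

-- ===== CLAIM (what is proved, stated in full; the proofs are below) =====
def Claim_equal_reverse_fasta : Prop := ∀ (fasta : List (String × String)), Dom_reverse_fasta fasta → Spec_reverse_fasta fasta (reverse_fasta fasta)

-- ===== LEMMAS AND PROOFS =====

-- A's branching step is exactly a 'modify' (append to the bucket, default []).
theorem pv_step_eq_modify (d : PySem.Dict String (List String)) (p : String × String) :
    (if d.contains p.2 then d.modify p.2 [] (fun l => l ++ [p.1])
     else d.insert p.2 [p.1]) = d.modify p.2 [] (fun l => l ++ [p.1]) := by
  by_cases h : d.contains p.2
  · simp [h]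
  · have h' : d.contains p.2 = false := by simpa using h
    rw [PySem.Dict.modify, PySem.Dict.getD_of_not_contains (h := h')]
    simp [h']

theorem pv_fold_eq (fasta : List (String × String)) :
    fasta.foldl
      (fun (d : PySem.Dict String (List String)) (p : String × String) =>
        if d.contains p.2 then d.modify p.2 [] (fun l => l ++ [p.1])
        else d.insert p.2 [p.1])
      PySem.Dict.empty
    = (fasta.map Prod.swap).foldl
        (fun (d : PySem.Dict String (List String)) (p : String × String) =>
          d.modify p.1 [] (fun l => l ++ [p.2]))
        PySem.Dict.empty := by
  rw [List.foldl_map]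
  exact PySem.List.foldl_congr_mem _ _ _ _ (fun d p _ => pv_step_eq_modify d p)

-- ===== VERDICT (by name: the statement is the Claim_ definition above) =====
theorem reverse_fasta_spec : Claim_equal_reverse_fasta := by
  intro fasta _
  show reverse_fasta fasta = reverse_fasta_alt fasta
  unfold reverse_fasta reverse_fasta_alt
  rw [pv_fold_eq]
  set l := fasta.map Prod.swap with hl
  have hnd : ((l.foldl (fun (d : PySem.Dict String (List String)) p => d.modify p.1 [] (fun t => t ++ [p.2])) PySem.Dict.empty)).keys.Nodup :=
    PySem.Dict.nodup_keys_foldl_modify_key l Prod.fst [] _ _ (by simp)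
  rw [PySem.Dict.items_eq_map_keys _ hnd []]
  have hkeys : ((l.foldl (fun (d : PySem.Dict String (List String)) p => d.modify p.1 [] (fun t => t ++ [p.2])) PySem.Dict.empty)).keys = PySem.List.dedup (fasta.map Prod.snd) := by
    rw [PySem.Dict.keys_foldl_modify_key]
    simp [hl, PySem.Set.update_nil_left, List.map_map, Function.comp_def]
  rw [hkeys]
  refine List.map_congr_left (fun s hs => ?_)
  rw [PySem.Dict.getD_foldl_modify_append]
  simp only [PySem.Dict.getD_empty, List.nil_append, hl, List.filter_map, List.map_map]
  congr 1
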